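-- pv_equiv track=rewrite | github.com/Shubham-Choudhury/GeeksforGeeks-Problems | 2024/06 June/Extract the Number from the String/main.py | ExtractNumber
-- ===== SOURCE A (Python) =====
-- def ExtractNumber(sentence):
--     max_num = -1
--     i = 0
--     while i < len(sentence):
--         is_nine = False
--         if sentence[i].isdigit():
--             num = 0
--             while i < len(sentence) and sentence[i].isdigit():
--                 if sentence[i] == "9":
--                     is_nine = True
--                 num = num * 10 + int(sentence[i])
--                 i += 1
--             if not is_nine and num > max_num:
--                 max_num = num
--         else:
--             i += 1
--     return max_num
-- ===== SOURCE B (Python) =====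
-- def ExtractNumber(sentence):
--     tokens = ''.join(c if c.isdigit() else ' ' for c in sentence).split()
--     return max((int(t) for t in tokens if '9' not in t), default=-1)
-- ===== Notes on version B (the rewrite author's own statement) =====
-- stated objective: idiomatic
-- what changed: Replaced A's index-based outer/inner while-loop state machine by a tokenize-then-reduce pipeline: map non-digit characters to spaces, split into maximal digit tokens, drop tokens containing the digit nine, and take the max of their int values with default -1.
import Mathlib
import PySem

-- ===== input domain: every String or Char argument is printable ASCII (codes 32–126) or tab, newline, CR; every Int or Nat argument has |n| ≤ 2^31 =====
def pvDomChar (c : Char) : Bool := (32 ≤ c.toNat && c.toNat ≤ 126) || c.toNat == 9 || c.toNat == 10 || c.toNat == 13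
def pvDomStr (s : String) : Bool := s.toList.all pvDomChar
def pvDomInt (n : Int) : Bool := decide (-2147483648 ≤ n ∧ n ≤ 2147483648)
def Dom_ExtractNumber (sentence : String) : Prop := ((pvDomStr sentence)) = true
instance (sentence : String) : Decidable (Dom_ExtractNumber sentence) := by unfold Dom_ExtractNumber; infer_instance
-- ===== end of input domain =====

-- B replaces A's index-based while-loop state machine by a tokenize/filter/max pipeline (idiomatic; same O(n) cost).

-- ===== PORT A =====
-- int(sentence[i]) for a single char: exact on '0'..'9' (guarded by isdigit on the ASCII domain)
def pvDigitVal (c : Char) : Int := (c.toNat : Int) - 48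

-- A's inner `while i < len(sentence) and sentence[i].isdigit(): ...` loop:
-- state (num, is_nine), returning the final state plus the unconsumed remainder
def pvConsume : List Char → Int → Bool → Int × Bool × List Char
  | [], num, nine => (num, nine, [])
  | c :: cs, num, nine =>
    if PySem.Chars.isdigit c then
      pvConsume cs (num * 10 + pvDigitVal c) (nine || c == '9')
    else (num, nine, c :: cs)

theorem pvConsume_len : ∀ (l : List Char) (n : Int) (b : Bool),
    (pvConsume l n b).2.2.length ≤ l.length := by
  intro l
  induction l with
  | nil => intro n b; simp [pvConsume]
  | cons c cs ih =>
    intro n b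
    by_cases h : PySem.Chars.isdigit c
    · simp only [pvConsume, h, if_true]
      exact Nat.le_succ_of_le (ih _ _)
    · simp [pvConsume, h]

-- A's outer while-loop over max_num (the first step of the inner loop is inlined in the digit branch)
def pvGoA : List Char → Int → Int
  | [], m => m
  | c :: cs, m =>
    if PySem.Chars.isdigit c then
      let r := pvConsume cs (pvDigitVal c) (c == '9')
      pvGoA r.2.2 (if !r.2.1 && r.1 > m then r.1 else m)
    else pvGoA cs m
termination_by l _ => l.length
decreasing_by
  all_goals simp only [List.length_cons]
  · have := pvConsume_len cs (pvDigitVal c) (c == '9')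
    omega
  · omega

def ExtractNumber (sentence : String) : Int :=
  pvGoA sentence.toList (-1)

-- ===== PORT B =====
-- int(t): exact for the nonempty all-digit tokens produced by the split below
def pvTokInt (t : List Char) : Int := t.foldl (fun n c => n * 10 + pvDigitVal c) 0

def ExtractNumber_alt (sentence : String) : Int :=
  -- ''.join(c if c.isdigit() else ' ' for c in sentence)
  let mapped := sentence.toList.map (fun c => if PySem.Chars.isdigit c then c else ' ')
  -- .split()
  let tokens := PySem.Chars.split₀ mapped
  -- (int(t) for t in tokens if '9' not in t)
  let vals := (tokens.filter (fun t => !(PySem.Chars.isIn ['9'] t))).map pvTokInt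
  -- max(..., default=-1)
  (PySem.List.max? vals (fun v => v)).getD (-1)

-- ===== PRECONDITION & SPEC =====
def Spec_ExtractNumber (sentence : String) (out : Int) : Prop := out = ExtractNumber_alt sentence
instance (sentence : String) (out : Int) : Decidable (Spec_ExtractNumber sentence out) := by unfold Spec_ExtractNumber; infer_instance

-- ===== CLAIM (what is proved, stated in full; the proofs are below) =====
def Claim_equal_ExtractNumber : Prop := ∀ (sentence : String), Dom_ExtractNumber sentence → Spec_ExtractNumber sentence (ExtractNumber sentence)

-- ===== LEMMAS AND PROOFS =====

-- the maximal digit runs of a char list (proof-side characterization of the tokenization)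
def pvRuns : List Char → List (List Char)
  | [] => []
  | c :: cs =>
    if PySem.Chars.isdigit c then
      (c :: cs.takeWhile PySem.Chars.isdigit) :: pvRuns (cs.dropWhile PySem.Chars.isdigit)
    else pvRuns cs
termination_by l => l.length
decreasing_by
  all_goals simp only [List.length_cons]
  · have := List.length_dropWhile_le (p := PySem.Chars.isdigit) cs
    omega
  · omega

theorem pv_digit_not_space (c : Char) (h : PySem.Chars.isdigit c = true) :
    PySem.Chars.isspace c = false := by
  simp only [PySem.Chars.isdigit, Bool.and_eq_true, decide_eq_true_eq, Char.le_def,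
    UInt32.le_iff_toNat_le] at h
  simp only [PySem.Chars.isspace, Char.toNat]
  simp only [Bool.or_eq_false_iff, Bool.and_eq_false_iff, decide_eq_false_iff_not]
  have h0 : ('0' : Char).val.toNat = 48 := by decide
  have h9 : ('9' : Char).val.toNat = 57 := by decide
  rw [h0, h9] at h
  omega

-- split₀.go on a digits-or-space list produces the digit runs
theorem pv_split_go (l : List Char) :
    ∀ (cur : List Char) (acc : List (List Char)),
    PySem.Chars.split₀.go (l.map (fun c => if PySem.Chars.isdigit c then c else ' ')) cur acc =
      if cur.isEmpty then acc.reverse ++ pvRuns l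
      else acc.reverse ++ (cur.reverse ++ l.takeWhile PySem.Chars.isdigit) ::
             pvRuns (l.dropWhile PySem.Chars.isdigit) := by
  induction l with
  | nil =>
    intro cur acc
    cases cur with
    | nil => simp [PySem.Chars.split₀.go, pvRuns]
    | cons x xs => simp [PySem.Chars.split₀.go, pvRuns]
  | cons c cs ih =>
    intro cur acc
    by_cases h : PySem.Chars.isdigit c
    · have hns := pv_digit_not_space c h
      simp only [List.map_cons, h, eq_self_iff_true, if_true]
      rw [PySem.Chars.split₀.go, if_neg (by simp [hns])]
      rw [ih (c :: cur) acc]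
      cases cur with
      | nil => simp [pvRuns, h]
      | cons x xs => simp [pvRuns, h]
    · simp only [List.map_cons, h, Bool.false_eq_true, if_false]
      rw [PySem.Chars.split₀.go, if_pos (by decide : PySem.Chars.isspace ' ' = true)]
      cases cur with
      | nil =>
        simp only [List.isEmpty_nil, if_true]
        rw [ih [] acc]
        simp [pvRuns, h]
      | cons x xs =>
        simp only [List.isEmpty_cons, if_false]
        rw [ih [] ((x :: xs).reverse :: acc)]
        simp [pvRuns, h]

theorem pv_split_eq (l : List Char) :
    PySem.Chars.split₀ (l.map (fun c => if PySem.Chars.isdigit c then c else ' ')) = pvRuns l := by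
  have := pv_split_go l [] []
  simpa [PySem.Chars.split₀] using this

theorem pvConsume_eq (l : List Char) (n : Int) (b : Bool) :
    pvConsume l n b =
      ((l.takeWhile PySem.Chars.isdigit).foldl (fun n c => n * 10 + pvDigitVal c) n,
       b || (l.takeWhile PySem.Chars.isdigit).any (· == '9'),
       l.dropWhile PySem.Chars.isdigit) := by
  induction l generalizing n b with
  | nil => simp [pvConsume]
  | cons c cs ih =>
    by_cases h : PySem.Chars.isdigit c
    · simp [pvConsume, h, ih, Bool.or_assoc]
    · simp [pvConsume, h]

-- A's loop equals a fold of its comparison body over the digit runs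
theorem pvGoA_eq (l : List Char) (m : Int) :
    pvGoA l m =
      (pvRuns l).foldl
        (fun m t => if !(t.any (· == '9')) && pvTokInt t > m then pvTokInt t else m) m := by
  induction l, m using pvGoA.induct with
  | case1 m => simp [pvGoA, pvRuns]
  | case2 c cs m h r ih =>
    rw [pvGoA]
    simp only [h, eq_self_iff_true, if_true]
    rw [pvRuns]
    simp only [h, eq_self_iff_true, if_true, List.foldl_cons]
    simp only [dite_eq_ite] at ih
    have hr : r = ((cs.takeWhile PySem.Chars.isdigit).foldl (fun n c => n * 10 + pvDigitVal c) (pvDigitVal c),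
        ((c == '9') || (cs.takeWhile PySem.Chars.isdigit).any (· == '9')),
        cs.dropWhile PySem.Chars.isdigit) := pvConsume_eq cs (pvDigitVal c) (c == '9')
    rw [hr] at ih
    rw [pvConsume_eq]
    simp only at ih ⊢
    rw [ih]
    congr 1
    simp [pvTokInt, List.any_cons]
  | case3 c cs m h ih =>
    rw [pvGoA]
    simp only [h, Bool.false_eq_true, if_false]
    rw [pvRuns]
    simp only [h, Bool.false_eq_true, if_false]
    exact ih

theorem pvTokInt_nonneg (t : List Char) (h : ∀ c ∈ t, PySem.Chars.isdigit c = true) :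
    0 ≤ pvTokInt t := by
  unfold pvTokInt
  have main : ∀ (u : List Char) (n : Int), (∀ c ∈ u, PySem.Chars.isdigit c = true) → 0 ≤ n →
      0 ≤ u.foldl (fun n c => n * 10 + pvDigitVal c) n := by
    intro u
    induction u with
    | nil => intro n _ hn; simpa using hn
    | cons c cs ih =>
      intro n hu hn
      simp only [List.foldl_cons]
      apply ih
      · intro x hx; exact hu x (List.mem_cons_of_mem _ hx)
      · have hc := hu c (List.mem_cons_self ..)
        simp only [PySem.Chars.isdigit, Bool.and_eq_true, decide_eq_true_eq, Char.le_def,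
          UInt32.le_iff_toNat_le] at hc
        have h0 : ('0' : Char).val.toNat = 48 := by decide
        rw [h0] at hc
        have h48 : (48 : Int) ≤ ((c.toNat : Int)) := by
          have := hc.1
          simp only [Char.toNat]
          exact_mod_cast this
        unfold pvDigitVal
        nlinarith
  exact main t 0 h le_rfl

theorem pvRuns_digits (l : List Char) :
    ∀ t ∈ pvRuns l, ∀ c ∈ t, PySem.Chars.isdigit c = true := by
  induction l using pvRuns.induct with
  | case1 => simp [pvRuns]
  | case2 c cs h ih =>
    rw [pvRuns]
    simp only [h, eq_self_iff_true, if_true]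
    intro t ht
    rcases List.mem_cons.mp ht with rfl | ht'
    · intro x hx
      rcases List.mem_cons.mp hx with rfl | hx'
      · exact h
      · exact List.mem_takeWhile_imp hx'
    · exact ih t ht'
  | case3 c cs h ih =>
    rw [pvRuns]
    simp only [h, Bool.false_eq_true, if_false]
    exact ih

-- Python's `'9' not in t` (single-char needle) as a per-char test
theorem pv_isIn_single (a : Char) (t : List Char) :
    PySem.Chars.isIn [a] t = t.any (· == a) := by
  by_cases h : a ∈ t
  · have hin : [a] <:+: t := by
      rcases List.append_of_mem h with ⟨s, u, rfl⟩
      exact ⟨s, u, by simp⟩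
    rw [(PySem.Chars.isIn_iff_infix _ _).mpr hin]
    symm
    simp only [List.any_eq_true, beq_iff_eq]
    exact ⟨a, h, rfl⟩
  · have hni : ¬ ([a] <:+: t) := fun hinf => h (hinf.subset (List.mem_singleton_self a))
    rw [(PySem.Chars.isIn_eq_false_iff _ _).mpr hni]
    symm
    simp only [List.any_eq_false, beq_iff_eq]
    intro x hx hxa
    exact h (hxa ▸ hx)

-- the fold of A's comparison body over tokens equals B's filter/map/max? pipeline
theorem pv_fold_max (ts : List (List Char)) :
    ∀ (m : Int) (acc : Option Int),
    (∀ t ∈ ts, 0 ≤ pvTokInt t) →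
    ((acc = none ∧ m = -1) ∨ acc = some m) →
    ts.foldl (fun m t => if !(t.any (· == '9')) && pvTokInt t > m then pvTokInt t else m) m =
      (((ts.filter (fun t => !(t.any (· == '9')))).map pvTokInt).foldl
        (fun acc x => match acc with
          | none => some x
          | some m => if m < x then some x else some m) acc).getD (-1) := by
  induction ts with
  | nil =>
    intro m acc _ hinv
    rcases hinv with ⟨rfl, rfl⟩ | rfl <;> simp
  | cons t ts ih =>
    intro m acc hn hinv
    by_cases h9 : t.any (· == '9')
    · simp only [List.foldl_cons, List.filter_cons, h9, Bool.not_true, Bool.false_and,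
        Bool.false_eq_true, if_false]
      exact ih m acc (fun u hu => hn u (List.mem_cons_of_mem _ hu)) hinv
    · have hnt : 0 ≤ pvTokInt t := hn t (List.mem_cons_self ..)
      rw [Bool.not_eq_true] at h9
      simp only [List.foldl_cons, List.filter_cons, h9, Bool.not_false, Bool.true_and, if_true,
        List.map_cons]
      rcases hinv with ⟨rfl, rfl⟩ | rfl
      · have hlt : pvTokInt t > (-1 : Int) := by omega
        simp only [decide_eq_true_eq]
        rw [if_pos hlt]
        exact ih _ (some (pvTokInt t)) (fun u hu => hn u (List.mem_cons_of_mem _ hu)) (Or.inr rfl)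
      · simp only [decide_eq_true_eq]
        by_cases hlt : pvTokInt t > m
        · rw [if_pos hlt, if_pos hlt]
          exact ih _ (some (pvTokInt t)) (fun u hu => hn u (List.mem_cons_of_mem _ hu)) (Or.inr rfl)
        · rw [if_neg hlt, if_neg hlt]
          exact ih _ (some m) (fun u hu => hn u (List.mem_cons_of_mem _ hu)) (Or.inr rfl)

-- ===== VERDICT (by name: the statement is the Claim_ definition above) =====
theorem ExtractNumber_spec : Claim_equal_ExtractNumber := by
  intro sentence _
  show ExtractNumber sentence = ExtractNumber_alt sentence
  show pvGoA sentence.toList (-1) =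
    (PySem.List.max?
      (((PySem.Chars.split₀
          (sentence.toList.map (fun c => if PySem.Chars.isdigit c then c else ' '))).filter
        (fun t => !(PySem.Chars.isIn ['9'] t))).map pvTokInt) (fun v => v)).getD (-1)
  rw [pv_split_eq]
  have hfilter : (pvRuns sentence.toList).filter (fun t => !(PySem.Chars.isIn ['9'] t)) =
      (pvRuns sentence.toList).filter (fun t => !(t.any (· == '9'))) := by
    apply List.filter_congr
    intro t _
    rw [pv_isIn_single]
  rw [hfilter, pvGoA_eq]
  rw [pv_fold_max _ (-1) none (fun t ht => pvTokInt_nonneg t (pvRuns_digits _ t ht))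
    (Or.inl ⟨rfl, rfl⟩)]
  have hmax : ∀ (vs : List Int), PySem.List.max? vs (fun v => v) =
      vs.foldl (fun acc x => match acc with
        | none => some x
        | some m => if m < x then some x else some m) none := by
    intro vs
    unfold PySem.List.max?
    congr 1
    funext acc x
    cases acc <;> rfl
  rw [hmax]
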